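-- pv_equiv track=rewrite | github.com/ecwu/bcsc | extract.py | hanging_course_name
-- ===== SOURCE A (Python) =====
-- from typing import Dict, List, Optional, Tuple
--
-- def hanging_course_name(course_raw: List[str]) -> List[str]:
--     """Extract hanging course name parts before parentheses."""
--     buffer = []
--     for line in course_raw:
--         if "(" in line:
--             break
--         if line:
--             buffer.append(line)
--     return buffer
-- ===== SOURCE B (Python) =====
-- def hanging_course_name(course_raw):
--     """Extract hanging course name parts before parentheses."""
--     acc = []
--     for line in reversed(course_raw):
--         if "(" in line:
--             acc = []
--         elif line:
--             acc.append(line)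
--     return acc[::-1]
-- ===== Notes on version B (the rewrite author's own statement) =====
-- stated objective: alternative
-- what changed: B traverses the list backwards as a right fold: it appends each non-empty line and empties the accumulator whenever a parenthesis-containing line is met, so only lines before the first such line survive, then reverses the result once - instead of A's forward loop with an early break.
import Mathlib
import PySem

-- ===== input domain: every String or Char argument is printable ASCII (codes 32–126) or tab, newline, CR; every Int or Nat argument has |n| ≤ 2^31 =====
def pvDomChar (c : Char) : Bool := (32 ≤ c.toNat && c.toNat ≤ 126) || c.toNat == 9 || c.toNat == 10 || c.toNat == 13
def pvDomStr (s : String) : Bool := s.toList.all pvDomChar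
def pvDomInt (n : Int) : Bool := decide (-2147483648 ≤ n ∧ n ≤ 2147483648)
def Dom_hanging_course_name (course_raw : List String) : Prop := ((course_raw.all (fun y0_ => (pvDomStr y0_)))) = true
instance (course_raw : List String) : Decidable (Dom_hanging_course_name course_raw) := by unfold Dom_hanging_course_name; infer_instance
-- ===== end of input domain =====

-- B replaces A's forward loop-with-break by a backward (right-fold) traversal that
-- resets its accumulator on every parenthesis-containing line; same O(n) cost.


-- ===== PORT A =====
-- 'for line in course_raw: if "(" in line: break; if line: buffer.append(line)'
def hangingLoopA : List String → List String → List String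
  | buf, [] => buf
  | buf, line :: rest =>
    if PySem.Str.isIn "(" line then buf
    else if line ≠ "" then hangingLoopA (buf ++ [line]) rest
    else hangingLoopA buf rest

def hanging_course_name (course_raw : List String) : List String :=
  hangingLoopA [] course_raw

-- ===== PORT B =====
-- 'for line in reversed(course_raw): if "(" in line: acc=[] elif line: acc.append(line); return acc[::-1]'
def hangingStepB (acc : List String) (line : String) : List String :=
  if PySem.Str.isIn "(" line then []
  else if line ≠ "" then acc ++ [line]
  else acc

def hanging_course_name_alt (course_raw : List String) : List String :=
  (course_raw.reverse.foldl hangingStepB []).reverse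

-- ===== PRECONDITION & SPEC =====
def Spec_hanging_course_name (course_raw : List String) (out : List String) : Prop := out = hanging_course_name_alt course_raw
instance (course_raw : List String) (out : List String) : Decidable (Spec_hanging_course_name course_raw out) := by unfold Spec_hanging_course_name; infer_instance

-- ===== CLAIM (what is proved, stated in full; the proofs are below) =====
def Claim_equal_hanging_course_name : Prop := ∀ (course_raw : List String), Dom_hanging_course_name course_raw → Spec_hanging_course_name course_raw (hanging_course_name course_raw)

-- ===== LEMMAS AND PROOFS =====
-- The cons-building mirror of B's append-building step.
def hangingConsB (line : String) (acc : List String) : List String :=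
  if PySem.Str.isIn "(" line then []
  else if line ≠ "" then line :: acc
  else acc

-- Reversing B's append-fold turns it into the cons-fold.
theorem foldl_stepB_reverse (l : List String) : ∀ acc,
    (l.foldl hangingStepB acc).reverse = l.foldl (fun r x => hangingConsB x r) acc.reverse := by
  induction l with
  | nil => intro acc; simp
  | cons x t ih =>
    intro acc
    simp only [List.foldl_cons]
    rw [ih]
    congr 1
    by_cases hp : PySem.Chars.isIn ['('] x.toList = true
    · simp [hangingStepB, hangingConsB, PySem.Str.isIn, show ("(").toList = ['('] from rfl, hp]
    · by_cases hx : x = "" <;>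
        simp [hangingStepB, hangingConsB, PySem.Str.isIn, show ("(").toList = ['('] from rfl, hp, hx,
          show PySem.Chars.isIn ['('] ([] : List Char) = false from rfl]
-- B's backward append-pass, reversed at the end, is the right fold of hangingConsB.
theorem alt_eq_foldr (xs : List String) :
    hanging_course_name_alt xs = xs.foldr hangingConsB [] := by
  unfold hanging_course_name_alt
  rw [foldl_stepB_reverse, List.reverse_nil, List.foldl_reverse]

-- Loop invariant for A: with accumulator buf, the loop returns buf ++ (right fold of the rest).
theorem hangingLoopA_eq (xs : List String) : ∀ buf,
    hangingLoopA buf xs = buf ++ xs.foldr hangingConsB [] := by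
  induction xs with
  | nil => intro buf; simp [hangingLoopA]
  | cons x rest ih =>
    intro buf
    by_cases hp : PySem.Str.isIn "(" x = true
    · have hp' : PySem.Chars.isIn ['('] x.toList = true := by
        simpa [PySem.Str.isIn, show ("(").toList = ['('] from rfl] using hp
      simp [hangingLoopA, hp', List.foldr_cons, hangingConsB]
    · by_cases hx : x = ""
      · subst hx
        simp only [hangingLoopA, List.foldr_cons, hangingConsB]
        rw [if_neg hp, if_neg (by simp), if_neg hp, if_neg (by simp), ih buf]
      · simp only [hangingLoopA, List.foldr_cons, hangingConsB]
        rw [if_neg hp, if_pos (by simpa using hx), if_neg hp, if_pos (by simpa using hx),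
          ih (buf ++ [x])]
        simp

-- ===== VERDICT (by name: the statement is the Claim_ definition above) =====
theorem hanging_course_name_spec : Claim_equal_hanging_course_name := by
  intro xs _
  unfold Spec_hanging_course_name hanging_course_name
  rw [alt_eq_foldr, hangingLoopA_eq]
  simp
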